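-- pv_equiv track=rewrite | github.com/OlgaKochneva/advent-of-code | 2015/5.py | is_string_nice_1
-- ===== SOURCE A (Python) =====
-- def is_string_nice_1(line: str) -> bool:
--     no_forbidden_substr = True # ab, cd, pq, xy
--     has_repetitive_letters = False # aa, bb, cc
--
--     vowels = 'aeiou'
--     vowels_counter = 0
--     forbidden_substrings = ['ab', 'cd', 'pq', 'xy']
--     line_size = len(line)
--
--     if line_size < 3: return False
--
--     for i in range(line_size):
--         if line[i] in vowels: vowels_counter += 1
--         if line[i:i + 2] in forbidden_substrings: no_forbidden_substr = False
--         if i != line_size - 1 and line[i] == line[i + 1]: has_repetitive_letters = True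
--
--     has_3_vowels = vowels_counter >= 3
--
--     return has_3_vowels and no_forbidden_substr and has_repetitive_letters
-- ===== SOURCE B (Python) =====
-- def is_string_nice_1(line: str) -> bool:
--     if len(line) < 3:
--         return False
--     vowels = sum(line.count(c) for c in 'aeiou')
--     forbidden = any(s in line for s in ['ab', 'cd', 'pq', 'xy'])
--     repeat = any(a == b for a, b in zip(line, line[1:]))
--     return vowels >= 3 and not forbidden and repeat
-- ===== Notes on version B (the rewrite author's own statement) =====
-- stated objective: simpler
-- what changed: Replaces the single index loop that threads three flags with three independent library-primitive passes: a vowel tally via str.count, forbidden pairs via substring search, and the doubled letter via zip of adjacent characters.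
import Mathlib
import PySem

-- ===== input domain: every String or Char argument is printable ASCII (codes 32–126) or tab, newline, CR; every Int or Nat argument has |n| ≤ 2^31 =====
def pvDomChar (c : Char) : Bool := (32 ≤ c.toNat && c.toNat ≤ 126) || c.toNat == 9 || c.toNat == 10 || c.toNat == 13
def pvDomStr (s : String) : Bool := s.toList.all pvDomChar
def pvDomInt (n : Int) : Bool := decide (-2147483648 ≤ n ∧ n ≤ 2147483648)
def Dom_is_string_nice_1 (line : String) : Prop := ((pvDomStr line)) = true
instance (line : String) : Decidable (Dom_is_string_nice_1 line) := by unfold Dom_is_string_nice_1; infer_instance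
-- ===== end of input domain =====

-- B replaces A's single index loop that threads three flags by three independent
-- library-primitive passes (vowel tally via count, forbidden pairs via substring
-- search, doubled letter via zip of adjacent characters); objective: simpler.

-- ===== PORT A =====
def pvVowels : List Char := "aeiou".toList
def pvForbidden : List (List Char) := ["ab".toList, "cd".toList, "pq".toList, "xy".toList]

-- the 'for i in range(line_size)' loop with its three accumulators
def pvALoop (l : List Char) (i : Nat) (vc : Int) (nf : Bool) (hr : Bool) : Int × Bool × Bool :=
  if i < l.length then
    let vc' := if PySem.Chars.isIn [PySem.List.pyGetD l (i : Int) ' '] pvVowels then vc + 1 else vc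
    let nf' := if (PySem.List.slice l (some (i : Int)) (some ((i : Int) + 2))) ∈ pvForbidden then false else nf
    let hr' := if (i : Int) ≠ (l.length : Int) - 1 ∧
                  PySem.List.pyGetD l (i : Int) ' ' = PySem.List.pyGetD l ((i : Int) + 1) ' ' then true else hr
    pvALoop l (i + 1) vc' nf' hr'
  else (vc, nf, hr)
termination_by l.length - i

def is_string_nice_1 (line : String) : Bool :=
  let l := line.toList
  let line_size := l.length
  if line_size < 3 then false
  else
    let r := pvALoop l 0 0 true false
    decide (3 ≤ r.1) && r.2.1 && r.2.2

-- ===== PORT B =====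
def is_string_nice_1_alt (line : String) : Bool :=
  let l := line.toList
  if l.length < 3 then false
  else
    let vowels := ("aeiou".toList.map (fun c => PySem.Chars.count l [c])).sum
    let forbidden := (["ab", "cd", "pq", "xy"] : List String).any (fun s => PySem.Str.isIn s line)
    let rep := (l.zip (PySem.List.slice l (some 1) none)).any (fun p => p.1 == p.2)
    decide (3 ≤ vowels) && !forbidden && rep

-- ===== PRECONDITION & SPEC =====
def Spec_is_string_nice_1 (line : String) (out : Bool) : Prop := out = is_string_nice_1_alt line
instance (line : String) (out : Bool) : Decidable (Spec_is_string_nice_1 line out) := by unfold Spec_is_string_nice_1; infer_instance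

-- ===== CLAIM (what is proved, stated in full; the proofs are below) =====
def Claim_equal_is_string_nice_1 : Prop := ∀ (line : String), Dom_is_string_nice_1 line → Spec_is_string_nice_1 line (is_string_nice_1 line)

-- ===== LEMMAS AND PROOFS =====

-- proof-side characterisations of the three quantities A's loop accumulates
def pvWin (t : List Char) : Bool := (t.zip t.tail).any (fun p => [p.1, p.2] ∈ pvForbidden)
def pvRep (t : List Char) : Bool := (t.zip t.tail).any (fun p => p.1 == p.2)
def pvVc (t : List Char) : Nat := t.countP (fun c => PySem.Chars.isIn [c] pvVowels)

theorem isIn_singleton (c : Char) (V : List Char) :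
    PySem.Chars.isIn [c] V = decide (c ∈ V) := by
  rcases h : PySem.Chars.isIn [c] V with _ | _
  · rw [PySem.Chars.isIn_eq_false_iff] at h
    simp [List.singleton_infix_iff] at h
    simp [h]
  · rw [PySem.Chars.isIn_iff_infix] at h
    simp [List.singleton_infix_iff] at h
    simp [h]

theorem isIn_decide_infix (sub l : List Char) :
    PySem.Chars.isIn sub l = decide (sub <:+: l) := by
  rcases h : PySem.Chars.isIn sub l with _ | _
  · rw [PySem.Chars.isIn_eq_false_iff] at h
    simp [h]
  · rw [PySem.Chars.isIn_iff_infix] at h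
    simp [h]

theorem infix_pair_iff (a b : Char) (l : List Char) :
    [a, b] <:+: l ↔ (a, b) ∈ l.zip l.tail := by
  induction l with
  | nil => simp
  | cons c t ih =>
    rw [List.infix_cons_iff, ih]
    cases t with
    | nil => simp
    | cons d t' =>
      constructor
      · rintro (h | h)
        · rcases h with ⟨s, hs⟩
          simp at hs
          obtain ⟨h1, h2, _⟩ := hs
          simp [h1, h2]
        · simp at h ⊢; tauto
      · intro h
        simp at h ⊢
        rcases h with ⟨h1, h2⟩ | h
        · left; simp [h1, h2]
        · tauto

theorem count_go_singleton (c : Char) (fuel : Nat) (l : List Char) (acc : Nat)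
    (h : l.length ≤ fuel) :
    PySem.Chars.count.go [c] fuel l acc = acc + l.count c := by
  induction fuel generalizing l acc with
  | zero =>
    cases l with
    | nil => simp [PySem.Chars.count.go]
    | cons x t => simp at h
  | succ n ih =>
    cases l with
    | nil => simp [PySem.Chars.count.go]
    | cons x t =>
      simp only [List.length_cons] at h
      rw [PySem.Chars.count.go]
      by_cases hc : c = x
      · subst hc
        simp [List.isPrefixOf, ih t (acc+1) (by omega), List.count_cons]
        omega
      · simp [List.isPrefixOf, Ne.symm hc, hc, ih t acc (by omega), List.count_cons]

theorem count_singleton (l : List Char) (c : Char) :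
    PySem.Chars.count l [c] = l.count c := by
  rw [PySem.Chars.count]
  simp [count_go_singleton c l.length l 0 le_rfl]

theorem countP_mem_cons (v : Char) (vs : List Char) (l : List Char) (hv : v ∉ vs) :
    l.countP (fun c => decide (c ∈ v :: vs)) = l.count v + l.countP (fun c => decide (c ∈ vs)) := by
  induction l with
  | nil => simp
  | cons c t ih =>
    simp only [List.countP_cons, List.count_cons, ih]
    by_cases h1 : c = v
    · subst h1
      simp [hv]
      omega
    · by_cases h2 : c ∈ vs <;> simp [h1, h2, Ne.symm h1] <;> omega

theorem vc_eq (l : List Char) :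
    (pvVc l : Int) = (("aeiou".toList.map (fun c => PySem.Chars.count l [c])).sum : Nat) := by
  have h1 : pvVc l = ("aeiou".toList.map (fun c => PySem.Chars.count l [c])).sum := by
    unfold pvVc
    simp only [isIn_singleton, count_singleton]
    have hv : pvVowels = ['a', 'e', 'i', 'o', 'u'] := rfl
    have ha : "aeiou".toList = ['a', 'e', 'i', 'o', 'u'] := rfl
    rw [hv, ha]
    rw [countP_mem_cons 'a' _ _ (by decide), countP_mem_cons 'e' _ _ (by decide),
        countP_mem_cons 'i' _ _ (by decide), countP_mem_cons 'o' _ _ (by decide),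
        countP_mem_cons 'u' _ _ (by decide)]
    simp
  rw [h1]

theorem win_eq (line : String) :
    pvWin line.toList = (["ab", "cd", "pq", "xy"] : List String).any (fun s => PySem.Str.isIn s line) := by
  have hios : ∀ (s : String), PySem.Str.isIn s line = PySem.Chars.isIn s.toList line.toList := by
    intro s
    simp [PySem.Str.isIn]
  rw [Bool.eq_iff_iff]
  simp only [pvWin, List.any_eq_true, hios, isIn_decide_infix, decide_eq_true_eq]
  constructor
  · rintro ⟨⟨x, y⟩, hp, hcase⟩
    simp [pvForbidden] at hcase
    rcases hcase with ⟨rfl, rfl⟩ | ⟨rfl, rfl⟩ | ⟨rfl, rfl⟩ | ⟨rfl, rfl⟩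
    · exact ⟨"ab", by simp, (infix_pair_iff _ _ _).mpr hp⟩
    · exact ⟨"cd", by simp, (infix_pair_iff _ _ _).mpr hp⟩
    · exact ⟨"pq", by simp, (infix_pair_iff _ _ _).mpr hp⟩
    · exact ⟨"xy", by simp, (infix_pair_iff _ _ _).mpr hp⟩
  · rintro ⟨s, hs, hinf⟩
    simp at hs
    rcases hs with rfl | rfl | rfl | rfl
    · rw [show ("ab".toList) = ['a', 'b'] from rfl] at hinf
      exact ⟨_, (infix_pair_iff _ _ _).mp hinf, by simp [pvForbidden]⟩
    · rw [show ("cd".toList) = ['c', 'd'] from rfl] at hinf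
      exact ⟨_, (infix_pair_iff _ _ _).mp hinf, by simp [pvForbidden]⟩
    · rw [show ("pq".toList) = ['p', 'q'] from rfl] at hinf
      exact ⟨_, (infix_pair_iff _ _ _).mp hinf, by simp [pvForbidden]⟩
    · rw [show ("xy".toList) = ['x', 'y'] from rfl] at hinf
      exact ⟨_, (infix_pair_iff _ _ _).mp hinf, by simp [pvForbidden]⟩

theorem pvALoop_spec (l : List Char) (i : Nat) (vc : Int) (nf hr : Bool) :
    pvALoop l i vc nf hr =
      (vc + pvVc (l.drop i), nf && !pvWin (l.drop i), hr || pvRep (l.drop i)) := by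
  by_cases h : i < l.length
  · rw [pvALoop]
    simp only [if_pos h]
    rw [pvALoop_spec l (i + 1)]
    have hget : PySem.List.pyGetD l (i : Int) ' ' = l[i] := by
      simp [List.getD_eq_getElem?_getD, h]
    have hslice : PySem.List.slice l (some (i : Int)) (some ((i : Int) + 2)) = (l.drop i).take 2 := by
      have h2 : ((i : Int) + 2) = ((i + 2 : Nat) : Int) := by push_cast; ring
      rw [h2, PySem.List.slice_natCast]
      congr 1
      omega
    have hd : l.drop i = l[i] :: l.drop (i + 1) := List.drop_eq_getElem_cons h
    rcases hrest : l.drop (i + 1) with _ | ⟨d, rest⟩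
    · have hlen : l.length = i + 1 := by
        have := List.drop_eq_nil_iff.mp hrest
        omega
      simp only [hd, hrest, hslice, hget]
      have hcond2 : ¬ ((i : Int) ≠ (l.length : Int) - 1 ∧
          l[i] = PySem.List.pyGetD l ((i : Int) + 1) ' ') := by
        rw [hlen]
        push_cast
        simp
      rw [if_neg hcond2]
      simp [pvVc, pvWin, pvRep, pvForbidden]
      split_ifs <;> push_cast <;> ring
    · have h1 : i + 1 < l.length := by
        have := congrArg List.length hrest
        simp at this
        omega
      have hd2 : l.drop (i + 1) = l[i + 1] :: l.drop (i + 2) := List.drop_eq_getElem_cons h1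
      have hdval : d = l[i + 1] := by rw [hrest] at hd2; exact (List.cons.injEq .. ▸ hd2).1
      have hc : ((i : Int) + 1) = ((i + 1 : Nat) : Int) := by push_cast; ring
      have hget2 : PySem.List.pyGetD l ((i : Int) + 1) ' ' = l[i + 1] := by
        rw [hc, PySem.List.pyGetD_natCast]
        simp [List.getD_eq_getElem?_getD, h1]
      have hne : (i : Int) ≠ (l.length : Int) - 1 := by
        push_cast
        omega
      have hcond : ((i : Int) ≠ (l.length : Int) - 1 ∧ l[i] = l[i + 1]) ↔ (l[i] = l[i + 1]) := by
        simp [hne]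
      simp only [hd, hrest, hslice, hget, hget2, hdval, hcond]
      simp only [Prod.mk.injEq]
      refine ⟨?_, ?_, ?_⟩
      · simp [pvVc, List.countP_cons]
        split_ifs <;> push_cast <;> ring
      · simp only [List.take_succ_cons, List.take_zero]
        split_ifs with hmem <;> simp [pvWin, hmem]
      · split_ifs with he
        · simp [pvRep, beq_iff_eq, he]
        · have hb : (l[i] == l[i + 1]) = false := beq_eq_false_iff_ne.mpr he
          simp [pvRep, hb]
  · rw [pvALoop]
    simp only [if_neg h]
    push_neg at h
    simp [List.drop_eq_nil_of_le h, pvVc, pvWin, pvRep]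
termination_by l.length - i

theorem rep_eq (line : String) :
    pvRep line.toList =
      (line.toList.zip (PySem.List.slice line.toList (some 1) none)).any (fun p => p.1 == p.2) := by
  rw [PySem.List.slice_from_one]
  rfl

-- ===== VERDICT (by name: the statement is the Claim_ definition above) =====
theorem is_string_nice_1_spec : Claim_equal_is_string_nice_1 := by
  intro line _
  unfold Spec_is_string_nice_1
  show is_string_nice_1 line = is_string_nice_1_alt line
  have h1 := pvALoop_spec line.toList 0 0 true false
  rw [List.drop_zero] at h1
  simp only [is_string_nice_1, is_string_nice_1_alt, h1]
  by_cases hlen : line.toList.length < 3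
  · rw [if_pos hlen, if_pos hlen]
  · rw [if_neg hlen, if_neg hlen]
    have e1 : decide ((3 : Int) ≤ 0 + (pvVc line.toList : Int)) =
        decide (3 ≤ ("aeiou".toList.map (fun c => PySem.Chars.count line.toList [c])).sum) := by
      rw [Bool.eq_iff_iff]
      simp only [decide_eq_true_eq, zero_add, vc_eq]
      omega
    have e2 : (true && !pvWin line.toList) =
        !((["ab", "cd", "pq", "xy"] : List String).any (fun s => PySem.Str.isIn s line)) := by
      rw [Bool.true_and, win_eq]
    have e3 : (false || pvRep line.toList) =
        (line.toList.zip (PySem.List.slice line.toList (some 1) none)).any (fun p => p.1 == p.2) := by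
      rw [Bool.false_or, rep_eq]
    rw [e1, e2, e3]
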